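-- pv_equiv track=rewrite | github.com/mirenk0/Algorithmic-Problems | 3-EfficientAlgorithms/forbidden.py | count
-- ===== SOURCE A (Python) =====
-- def count(s):
--     l = len(s)
--     result = 0
--     count = 0
--
--     for e in range(l):
--         if e >= 0 and s[e] == 'a':
--             count = 0
--             continue
--
--         count += 1
--         result += count
--
--     return result
-- ===== SOURCE B (Python) =====
-- def count(s):
--     return sum(n * (n + 1) // 2 for n in map(len, s.split('a')))
-- ===== Notes on version B (the rewrite author's own statement) =====
-- stated objective: simpler
-- what changed: Replaces the per-character accumulator loop with splitting the string on the forbidden letter and summing the closed-form n*(n+1)//2 over each maximal run.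
import Mathlib
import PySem

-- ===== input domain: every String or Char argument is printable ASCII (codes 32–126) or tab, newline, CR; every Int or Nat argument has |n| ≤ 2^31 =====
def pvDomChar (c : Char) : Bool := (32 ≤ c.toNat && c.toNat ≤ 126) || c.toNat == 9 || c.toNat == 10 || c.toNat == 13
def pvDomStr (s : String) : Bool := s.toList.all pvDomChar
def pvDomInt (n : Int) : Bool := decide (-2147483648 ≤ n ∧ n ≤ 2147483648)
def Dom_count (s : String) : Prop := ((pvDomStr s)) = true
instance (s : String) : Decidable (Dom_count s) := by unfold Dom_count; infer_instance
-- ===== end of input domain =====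

-- B replaces A's per-character accumulator loop with split-on-'a' plus the closed form n*(n+1)//2 per run (objective: simpler).

-- ===== PORT A =====
-- the loop 'for e in range(l)' with state (result, count); the 'e >= 0' guard is always true inside range(l)
def countGo : List Char → Int → Int → Int
  | [], result, _ => result
  | c :: rest, result, cnt =>
      if c = 'a' then countGo rest result 0
      else countGo rest (result + (cnt + 1)) (cnt + 1)

def count (s : String) : Int := countGo s.toList 0 0

-- ===== PORT B =====
def count_alt (s : String) : Int :=
  (((PySem.Chars.splitOn s.toList ['a']).map (fun seg => (seg.length : Int))).map
    (fun n => PySem.Int.floordiv (n * (n + 1)) 2)).sum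

-- ===== PRECONDITION & SPEC =====
def Spec_count (s : String) (out : Int) : Prop := out = count_alt s
instance (s : String) (out : Int) : Decidable (Spec_count s out) := by unfold Spec_count; infer_instance

-- ===== CLAIM (what is proved, stated in full; the proofs are below) =====
def Claim_equal_count : Prop := ∀ (s : String), Dom_count s → Spec_count s (count s)

-- ===== LEMMAS AND PROOFS =====

-- structural description of Python's split on the single character 'a'
def runsSplit : List Char → List (List Char)
  | [] => [[]]
  | c :: rest =>
      if c = 'a' then [] :: runsSplit rest
      else
        match runsSplit rest with
        | r :: rs => (c :: r) :: rs
        | [] => [[c]]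

lemma runsSplit_ne_nil (l : List Char) : runsSplit l ≠ [] := by
  cases l with
  | nil => simp [runsSplit]
  | cons c rest =>
    simp only [runsSplit]
    split_ifs
    · simp
    · cases h : runsSplit rest <;> simp

lemma go_eq : ∀ (fuel : Nat) (l cur : List Char) (acc : List (List Char)),
    l.length < fuel →
    PySem.Chars.splitOn.go ['a'] fuel l cur acc =
      acc.reverse ++ (runsSplit l).modifyHead (cur.reverse ++ ·) := by
  intro fuel
  induction fuel with
  | zero => intro l cur acc h; omega
  | succ f ih =>
    intro l cur acc h
    cases l with
    | nil =>
      simp [PySem.Chars.splitOn.go, runsSplit]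
    | cons c rest =>
      by_cases hc : c = 'a'
      · subst hc
        have hpre : (['a'] : List Char).isPrefixOf ('a' :: rest) = true := by
          simp [List.isPrefixOf]
        rw [show PySem.Chars.splitOn.go ['a'] (f + 1) ('a' :: rest) cur acc =
            PySem.Chars.splitOn.go ['a'] f (List.drop (['a'] : List Char).length ('a' :: rest)) []
              (cur.reverse :: acc) by
          simp [PySem.Chars.splitOn.go, hpre]]
        simp only [List.length_singleton, List.drop_succ_cons, List.drop_zero]
        rw [ih rest [] (cur.reverse :: acc) (by simpa using Nat.lt_of_succ_lt_succ (by simpa using h))]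
        cases hrr : runsSplit rest <;> simp [runsSplit, hrr]
      · have hpre : (['a'] : List Char).isPrefixOf (c :: rest) = false := by
          simp [List.isPrefixOf]; exact fun h => hc h.symm
        rw [show PySem.Chars.splitOn.go ['a'] (f + 1) (c :: rest) cur acc =
            PySem.Chars.splitOn.go ['a'] f rest (c :: cur) acc by
          simp [PySem.Chars.splitOn.go, hpre]]
        rw [ih rest (c :: cur) acc (by simpa using Nat.lt_of_succ_lt_succ (by simpa using h))]
        simp only [runsSplit, hc, if_false]
        cases hr : runsSplit rest with
        | nil => exact absurd hr (runsSplit_ne_nil rest)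
        | cons r rs => simp [List.modifyHead]

lemma splitOn_eq_runsSplit (l : List Char) :
    PySem.Chars.splitOn l ['a'] = runsSplit l := by
  rw [PySem.Chars.splitOn, go_eq (l.length + 1) l [] [] (by omega)]
  cases h : runsSplit l with
  | nil => exact absurd h (runsSplit_ne_nil l)
  | cons r rs => simp [List.modifyHead]

-- the triangular closed form
def T (n : Int) : Int := PySem.Int.floordiv (n * (n + 1)) 2

lemma T_succ (n : Int) : T (n + 1) = T n + (n + 1) := by
  unfold T
  rw [PySem.Int.floordiv, PySem.Int.floordiv]
  simp only [Int.fdiv_eq_ediv]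
  norm_num
  rw [show (n + 1) * (n + 1 + 1) = n * (n + 1) + (n + 1) * 2 by ring,
    Int.add_mul_ediv_right _ _ (by norm_num)]

lemma T_zero : T 0 = 0 := by decide

def bsum (rs : List (List Char)) : Int := (rs.map (fun seg => T (seg.length : Int))).sum

lemma bsum_cons (r : List Char) (rs : List (List Char)) :
    bsum (r :: rs) = T (r.length : Int) + bsum rs := by simp [bsum]

lemma countGo_eq (l : List Char) : ∀ (res cnt : Int),
    countGo l res cnt =
      res + (T (cnt + ((runsSplit l).headI.length : Int)) - T cnt) + bsum (runsSplit l).tail := by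
  induction l with
  | nil => intro res cnt; simp [countGo, runsSplit, bsum]
  | cons c rest ih =>
    intro res cnt
    by_cases hc : c = 'a'
    · subst hc
      simp only [countGo, if_pos]
      rw [ih res 0]
      cases hr : runsSplit rest with
      | nil => exact absurd hr (runsSplit_ne_nil rest)
      | cons r rs =>
        simp [runsSplit, hr, bsum_cons, T_zero]
        ring
    · simp only [countGo, if_neg hc]
      rw [ih (res + (cnt + 1)) (cnt + 1)]
      cases hr : runsSplit rest with
      | nil => exact absurd hr (runsSplit_ne_nil rest)
      | cons r rs =>
        simp only [runsSplit, hc, if_false, hr, List.headI, List.tail]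
        have hT := T_succ cnt
        have hlen : ((c :: r).length : Int) = (r.length : Int) + 1 := by simp
        rw [hlen]
        have harg : cnt + 1 + (r.length : Int) = cnt + ((r.length : Int) + 1) := by ring
        rw [harg]
        linarith [hT]

lemma count_alt_eq_bsum (s : String) : count_alt s = bsum (runsSplit s.toList) := by
  unfold count_alt bsum T
  rw [splitOn_eq_runsSplit, List.map_map]
  rfl

-- ===== VERDICT (by name: the statement is the Claim_ definition above) =====
theorem count_spec : Claim_equal_count := by
  intro s _
  unfold Spec_count
  rw [count_alt_eq_bsum]
  unfold count
  rw [countGo_eq s.toList 0 0]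
  cases hr : runsSplit s.toList with
  | nil => exact absurd hr (runsSplit_ne_nil s.toList)
  | cons r rs => simp [bsum_cons, T_zero]
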